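-- pv_equiv track=rewrite | github.com/Lay-RosaLauren/Coursera-Python-2 | Week02/maisculas.py | maiusculas
-- ===== SOURCE A (Python) =====
-- def maiusculas(frase):
--     maiusculas = []
--
--     for i in range(len(frase)):
--         caracter = frase[i]
--         decASCII = ord(caracter)
--
--         if decASCII > 64 and decASCII < 91:
--             maiusculas.append(caracter)
--
--     return "".join(maiusculas)
-- ===== SOURCE B (Python) =====
-- import re
--
-- def maiusculas(frase):
--     return "".join(re.findall('[A-Z]', frase))
-- ===== Notes on version B (the rewrite author's own statement) =====
-- stated objective: idiomatic
-- what changed: Replaces the explicit index loop with per-character ord tests by a single regex findall of [A-Z] joined into a string; the regex engine does the scanning in C.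
import Mathlib
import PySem

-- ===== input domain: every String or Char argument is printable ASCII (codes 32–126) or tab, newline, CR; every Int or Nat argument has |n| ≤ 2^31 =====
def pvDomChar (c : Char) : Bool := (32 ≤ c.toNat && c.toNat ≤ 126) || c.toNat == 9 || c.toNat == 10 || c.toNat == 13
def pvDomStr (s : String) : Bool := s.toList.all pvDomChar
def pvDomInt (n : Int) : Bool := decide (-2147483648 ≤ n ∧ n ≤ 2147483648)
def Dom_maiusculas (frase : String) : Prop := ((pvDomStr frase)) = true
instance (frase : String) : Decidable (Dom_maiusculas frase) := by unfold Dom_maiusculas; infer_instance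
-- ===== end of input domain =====

-- B replaces A's explicit index loop with ord tests by a regex findall of [A-Z] joined into a string (idiomatic).

-- ===== PORT A =====
def maiusculas (frase : String) : String :=
  let cs := frase.toList
  let ms := (PySem.List.pyRange 0 (cs.length : Int) 1).foldl
    (fun (m : List Char) i =>
      let caracter := PySem.List.pyGetD cs i ' '   -- frase[i]; i is always in range here
      let decASCII := caracter.toNat
      if decASCII > 64 && decASCII < 91 then m ++ [caracter] else m) []
  String.ofList ms

-- ===== PORT B =====
-- re.findall('[A-Z]', frase): the single-character ms in order, then "".join
def maiusculas_alt (frase : String) : String :=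
  let ms := (frase.toList.filter (fun c => 'A' ≤ c && c ≤ 'Z')).map (fun c => [c])
  String.ofList (PySem.Chars.join [] ms)

-- ===== PRECONDITION & SPEC =====
def Spec_maiusculas (frase : String) (out : String) : Prop := out = maiusculas_alt frase
instance (frase : String) (out : String) : Decidable (Spec_maiusculas frase out) := by unfold Spec_maiusculas; infer_instance

-- ===== CLAIM (what is proved, stated in full; the proofs are below) =====
def Claim_equal_maiusculas : Prop := ∀ (frase : String), Dom_maiusculas frase → Spec_maiusculas frase (maiusculas frase)

-- ===== LEMMAS AND PROOFS =====
theorem maiusculas_cond_eq (c : Char) :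
    (decide (c.toNat > 64) && decide (c.toNat < 91)) = ('A' ≤ c && c ≤ 'Z') := by
  rcases c with ⟨v, _⟩
  simp [Char.le_def]
  rw [Bool.eq_iff_iff]
  simp [UInt32.le_iff_toNat_le]
  omega

-- ===== VERDICT (by name: the statement is the Claim_ definition above) =====
theorem maiusculas_spec : Claim_equal_maiusculas := by
  intro frase _
  unfold Spec_maiusculas maiusculas maiusculas_alt
  simp only [PySem.List.foldl_pyRange_zero_pyGetD' frase.toList ' '
      (fun m c => if c.toNat > 64 && c.toNat < 91 then m ++ [c] else m) []]
  rw [PySem.List.foldl_append_if_eq_filter]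
  rw [PySem.Chars.join_nil_singletons]
  simp only [List.nil_append]
  congr 1
  apply List.filter_congr
  intro c _
  exact maiusculas_cond_eq c
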